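-- pv_equiv track=rewrite | github.com/LebedevKrll/SchoolProjects | LevensteinLength.py | modify_word
-- ===== SOURCE A (Python) =====
-- def modify_word(first_word: str, edit_actions: str, letters: str) -> str:
--     ans = first_word
--     ans_list = []
--     for i in ans:
--         ans_list.append(i)
--     el_num_in_word = el_num_in_letters = 0
--     for func in edit_actions:
--         if func == "R":
--             ans_list[el_num_in_word] = letters[el_num_in_letters]
--             el_num_in_letters += 1
--         elif func == "I":
--             ans_list.insert(el_num_in_word, letters[el_num_in_letters])
--             el_num_in_letters += 1
--         elif func == "D":
--             del ans_list[el_num_in_word]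
--             el_num_in_word -= 1
--         el_num_in_word += 1
--     return ''.join(ans_list)
-- ===== SOURCE B (Python) =====
-- def modify_word(first_word: str, edit_actions: str, letters: str) -> str:
--     # One streaming, append-only pass: an index j into the original word and k
--     # into letters; no list is ever edited in place, the untouched suffix of the
--     # original word is concatenated once at the end.
--     out = []
--     j = k = 0
--     for f in edit_actions:
--         if f in "RI":
--             out.append(letters[k])
--             k += 1
--             if f != "I":
--                 j += 1
--         elif j < len(first_word) and f != "D":
--             out.append(first_word[j])
--             j += 1
--         else:
--             j += 1
--     return ''.join(out) + first_word[j:]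
-- ===== Notes on version B (the rewrite author's own statement) =====
-- stated objective: alternative
-- what changed: Replaces A's in-place list editing (insert/delete at a moving cursor inside the loop) by a single append-only streaming pass with an index into the original word, merged R/I handling, and one final concatenation of the untouched suffix; its Lean port is a structural recursion over the actions instead of A's Option-fold.
import Mathlib
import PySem

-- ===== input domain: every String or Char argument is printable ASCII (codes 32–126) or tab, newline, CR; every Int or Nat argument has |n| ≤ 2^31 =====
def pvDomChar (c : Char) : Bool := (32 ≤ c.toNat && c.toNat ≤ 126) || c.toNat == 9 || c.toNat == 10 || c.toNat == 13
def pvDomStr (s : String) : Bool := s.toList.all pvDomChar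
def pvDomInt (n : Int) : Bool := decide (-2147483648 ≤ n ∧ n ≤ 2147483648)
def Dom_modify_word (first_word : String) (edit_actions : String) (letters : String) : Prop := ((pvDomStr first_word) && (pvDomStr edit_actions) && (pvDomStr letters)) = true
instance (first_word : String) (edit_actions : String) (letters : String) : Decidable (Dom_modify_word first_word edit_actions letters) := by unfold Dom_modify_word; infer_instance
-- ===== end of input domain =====

-- B replaces A's in-place list editing (insert/delete at a moving cursor) by one
-- append-only streaming pass over the actions with an index into the original word.

-- ===== PORT A =====
-- one loop iteration of A: state = (ans_list, el_num_in_word, el_num_in_letters);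
-- none = the Python statement raised (IndexError)
def stepA (letters : List Char) (st : List Char × Int × Int) (f : Char) : Option (List Char × Int × Int) :=
  if f = 'R' then
    (PySem.List.pyGet? letters st.2.2).bind fun c =>
      (PySem.List.pySet? st.1 st.2.1 c).map fun l => (l, st.2.1 + 1, st.2.2 + 1)
  else if f = 'I' then
    (PySem.List.pyGet? letters st.2.2).map fun c =>
      (PySem.List.insert st.1 st.2.1 c, st.2.1 + 1, st.2.2 + 1)
  else if f = 'D' then
    (PySem.List.pop? st.1 st.2.1).map fun r => (r.2, st.2.1 - 1 + 1, st.2.2)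
  else
    some (st.1, st.2.1 + 1, st.2.2)

def modify_word (first_word : String) (edit_actions : String) (letters : String) : String :=
  -- ans = first_word; ans_list = []; for i in ans: ans_list.append(i)
  let ans_list := first_word.toList.foldl (fun acc c => acc ++ [c]) []
  match edit_actions.toList.foldl (fun o f => o.bind (fun st => stepA letters.toList st f))
      (some (ans_list, 0, 0)) with
  | some (l, _, _) => String.ofList l        -- ''.join(ans_list)
  | none => ""                           -- unreachable under Pre_ (the Python raises here)

-- ===== PORT B =====
-- B's for-loop as structural recursion over the remaining actions;
-- state (out, j, k) carried as arguments; none = letters[k] raised (IndexError)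
def goB (w ls : List Char) : List Char → List Char → Int → Int → Option (List Char × Int)
  | [], out, j, _ => some (out, j)
  | f :: rest, out, j, k =>
    if f = 'R' ∨ f = 'I' then                                -- f in "RI"
      (PySem.List.pyGet? ls k).bind fun c =>
        goB w ls rest (out ++ [c]) (if f = 'I' then j else j + 1) (k + 1)
    else if j < (w.length : Int) ∧ f ≠ 'D' then
      -- first_word[j] under the guard 0 ≤ j < len: exact (the default is never used)
      goB w ls rest (out ++ [PySem.List.pyGetD w j ' ']) (j + 1) k
    else
      goB w ls rest out (j + 1) k

def modify_word_alt (first_word : String) (edit_actions : String) (letters : String) : String :=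
  match goB first_word.toList letters.toList edit_actions.toList [] 0 0 with
  | some (out, j) =>                                         -- ''.join(out) + first_word[j:]
      String.ofList (out ++ PySem.List.slice first_word.toList (some j) none)
  | none => ""

-- ===== PRECONDITION & SPEC =====
-- number of letters consumed by a prefix of actions ('R' and 'I' each consume one)
def cRI (l : List Char) : Nat := l.countP (fun f => f == 'R' || f == 'I')
-- number of word positions consumed by a prefix of actions (everything except 'I')
def cNI (l : List Char) : Nat := l.countP (fun f => !(f == 'I'))

-- exactly the inputs on which the Python A returns: every 'R'/'I' still has a letter left,
-- and every 'R'/'D' happens with the cursor inside the current list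
def Pre_modify_word (first_word : String) (edit_actions : String) (letters : String) : Prop :=
  ∀ i, (h : i < edit_actions.toList.length) →
    ((edit_actions.toList[i] = 'R' ∨ edit_actions.toList[i] = 'I') →
        cRI (edit_actions.toList.take i) < letters.toList.length) ∧
    ((edit_actions.toList[i] = 'R' ∨ edit_actions.toList[i] = 'D') →
        cNI (edit_actions.toList.take i) < first_word.toList.length)
instance (first_word : String) (edit_actions : String) (letters : String) : Decidable (Pre_modify_word first_word edit_actions letters) := by unfold Pre_modify_word; infer_instance

def pvWitness_modify_word : String × String × String := ("kitten", "RID MM", "se")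

def Spec_modify_word (first_word : String) (edit_actions : String) (letters : String) (out : String) : Prop := out = modify_word_alt first_word edit_actions letters
instance (first_word : String) (edit_actions : String) (letters : String) (out : String) : Decidable (Spec_modify_word first_word edit_actions letters out) := by unfold Spec_modify_word; infer_instance

-- ===== CLAIM (what is proved, stated in full; the proofs are below) =====
def Claim_equal_modify_word : Prop := ∀ (first_word : String) (edit_actions : String) (letters : String), Dom_modify_word first_word edit_actions letters → Pre_modify_word first_word edit_actions letters → Spec_modify_word first_word edit_actions letters (modify_word first_word edit_actions letters)

-- ===== LEMMAS AND PROOFS =====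

lemma foldl_append_build (l acc : List Char) :
    l.foldl (fun acc c => acc ++ [c]) acc = acc ++ l := by
  induction l generalizing acc with
  | nil => simp
  | cons c t ih => simp [List.foldl_cons, ih]

-- the invariant cursor value of A given B's (out, j)
def posOf (w out : List Char) (j : Nat) : Int :=
  (out.length : Int) + (j : Int) - ((min j w.length : Nat) : Int)

lemma insert_ge (l : List Char) (i : Int) (v : Char) (h : (l.length : Int) ≤ i) :
    PySem.List.insert l i v = l ++ [v] := by
  have h2 : (PySem.List.sliceIndices l.length (some i) none 1).1.toNat = l.length := by
    simp [PySem.List.sliceIndices]; omega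
  simp [PySem.List.insert, h2]

lemma main_inv (w ls : List Char) (acts : List Char) : ∀ (out : List Char) (j k : Nat),
    (∀ i, (h : i < acts.length) →
      ((acts[i] = 'R' ∨ acts[i] = 'I') → k + cRI (acts.take i) < ls.length) ∧
      ((acts[i] = 'R' ∨ acts[i] = 'D') → j + cNI (acts.take i) < w.length)) →
    ∃ (out' : List Char) (j' k' : Nat),
      goB w ls acts out (j:Int) (k:Int) = some (out', (j':Int)) ∧
      acts.foldl (fun o f => o.bind (fun st => stepA ls st f))
          (some (out ++ w.drop j, posOf w out j, (k:Int)))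
        = some (out' ++ w.drop j', posOf w out' j', (k':Int)) := by
  induction acts with
  | nil => intro out j k _; exact ⟨out, j, k, rfl, rfl⟩
  | cons f rest ih =>
    intro out j k hpre
    have h0 := hpre 0 (by simp)
    simp only [List.take_zero, cRI, cNI, List.countP_nil, Nat.add_zero,
      List.getElem_cons_zero] at h0
    have hshift : ∀ (dj dk : Nat), cRI [f] = dk → cNI [f] = dj →
        ∀ i, (h : i < rest.length) →
        ((rest[i] = 'R' ∨ rest[i] = 'I') → (k + dk) + cRI (rest.take i) < ls.length) ∧
        ((rest[i] = 'R' ∨ rest[i] = 'D') → (j + dj) + cNI (rest.take i) < w.length) := by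
      intro dj dk hdk hdj i hi
      have h1 := hpre (i+1) (by simpa using Nat.succ_lt_succ hi)
      simp only [List.getElem_cons_succ, List.take_succ_cons] at h1
      have e1 : cRI (f :: rest.take i) = cRI [f] + cRI (rest.take i) := by
        simp [cRI, List.countP_cons]; omega
      have e2 : cNI (f :: rest.take i) = cNI [f] + cNI (rest.take i) := by
        simp [cNI, List.countP_cons]; omega
      rw [e1, e2, hdk, hdj] at h1
      exact ⟨fun hx => by have := h1.1 hx; omega, fun hx => by have := h1.2 hx; omega⟩
    by_cases hR : f = 'R'
    · -- replace: consumes one letter and one word position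
      have hk : k < ls.length := h0.1 (Or.inl hR)
      have hj : j < w.length := h0.2 (Or.inl hR)
      obtain ⟨out', j', k', hB, hA⟩ := ih (out ++ [ls[k]]) (j+1) (k+1)
        (hshift 1 1 (by simp [cRI, hR]) (by simp [cNI, hR]))
      refine ⟨out', j', k', ?_, ?_⟩
      · have : goB w ls (f :: rest) out (j:Int) (k:Int)
            = goB w ls rest (out ++ [ls[k]]) ((j:Int) + 1) ((k:Int) + 1) := by
          simp [goB, hR, PySem.List.pyGet?_natCast, List.getElem?_eq_getElem hk]
        rw [this]
        have e1 : ((j:Int) + 1) = (((j+1:Nat)):Int) := by push_cast; ring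
        have e2 : ((k:Int) + 1) = (((k+1:Nat)):Int) := by push_cast; ring
        rw [e1, e2]; exact hB
      · rw [List.foldl_cons]
        have hpos : posOf w out j = ((out.length:Nat):Int) := by simp [posOf]; omega
        have hlen : out.length < (out ++ w.drop j).length := by simp; omega
        have hd : w.drop j = w[j] :: w.drop (j+1) := List.drop_eq_getElem_cons hj
        have hpos2 : ((out.length:Int) + 1) = posOf w (out ++ [ls[k]]) (j+1) := by
          simp [posOf]; omega
        have hset0 : (List.drop j w).set 0 (ls[k]) = ls[k] :: List.drop (j+1) w := by
          rw [hd, List.set_cons_zero]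
        have hstep : (some (out ++ w.drop j, posOf w out j, (k:Int))).bind (fun st => stepA ls st f)
            = some ((out ++ [ls[k]]) ++ w.drop (j+1), posOf w (out ++ [ls[k]]) (j+1), ((k+1:Nat):Int)) := by
          rw [hpos]
          simp [stepA, hR, PySem.List.pyGet?_natCast, List.getElem?_eq_getElem hk,
            PySem.List.pySet?_natCast _ _ _ hlen, hset0, ← hpos2]
        rw [hstep]; exact hA
    · by_cases hI : f = 'I'
      · -- insert: consumes one letter, no word position
        have hk : k < ls.length := h0.1 (Or.inr hI)
        obtain ⟨out', j', k', hB, hA⟩ := ih (out ++ [ls[k]]) j (k+1)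
          (hshift 0 1 (by simp [cRI, hI]) (by simp [cNI, hI]))
        refine ⟨out', j', k', ?_, ?_⟩
        · have : goB w ls (f :: rest) out (j:Int) (k:Int)
              = goB w ls rest (out ++ [ls[k]]) (j:Int) ((k:Int) + 1) := by
            simp [goB, hI, PySem.List.pyGet?_natCast, List.getElem?_eq_getElem hk]
          rw [this]
          have e2 : ((k:Int) + 1) = (((k+1:Nat)):Int) := by push_cast; ring
          rw [e2]; exact hB
        · rw [List.foldl_cons]
          have hpos2 : posOf w out j + 1 = posOf w (out ++ [ls[k]]) j := by
            simp [posOf]; omega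
          have hins : PySem.List.insert (out ++ w.drop j) (posOf w out j) (ls[k])
              = (out ++ [ls[k]]) ++ w.drop j := by
            by_cases hj : j ≤ w.length
            · have hpos : posOf w out j = ((out.length:Nat):Int) := by simp [posOf]; omega
              rw [hpos, PySem.List.insert_natCast _ _ _ (by simp), List.take_left,
                List.drop_left, List.append_assoc, List.singleton_append]
            · have hdrop : w.drop j = [] := List.drop_eq_nil_of_le (by omega)
              rw [hdrop, List.append_nil, insert_ge _ _ _ (by simp [posOf]; omega),
                List.append_nil]
          have hstep : (some (out ++ w.drop j, posOf w out j, (k:Int))).bind (fun st => stepA ls st f)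
              = some ((out ++ [ls[k]]) ++ w.drop j, posOf w (out ++ [ls[k]]) j, ((k+1:Nat):Int)) := by
            simp [stepA, hI, PySem.List.pyGet?_natCast, List.getElem?_eq_getElem hk,
              hins, ← hpos2]
          rw [hstep]; exact hA
      · by_cases hD : f = 'D'
        · -- delete: consumes one word position, appends nothing
          have hj : j < w.length := h0.2 (Or.inr hD)
          obtain ⟨out', j', k', hB, hA⟩ := ih out (j+1) k
            (hshift 1 0 (by simp [cRI, hD]) (by simp [cNI, hD]))
          refine ⟨out', j', k', ?_, ?_⟩
          · have : goB w ls (f :: rest) out (j:Int) (k:Int)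
                = goB w ls rest out ((j:Int) + 1) (k:Int) := by
              simp [goB, hD]
            rw [this]
            have e1 : ((j:Int) + 1) = (((j+1:Nat)):Int) := by push_cast; ring
            rw [e1]; exact hB
          · rw [List.foldl_cons]
            have hpos : posOf w out j = ((out.length:Nat):Int) := by simp [posOf]; omega
            have hlen : out.length < (out ++ w.drop j).length := by simp; omega
            have hd : w.drop j = w[j] :: w.drop (j+1) := List.drop_eq_getElem_cons hj
            have hpos2 : ((out.length:Int)) = posOf w out (j+1) := by simp [posOf]; omega
            have herase : (out ++ w.drop j).eraseIdx out.length = out ++ w.drop (j+1) := by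
              rw [hd, List.eraseIdx_append_of_length_le (le_refl _), Nat.sub_self,
                List.eraseIdx_cons_zero]
            have hstep : (some (out ++ w.drop j, posOf w out j, (k:Int))).bind (fun st => stepA ls st f)
                = some (out ++ w.drop (j+1), posOf w out (j+1), (k:Int)) := by
              rw [hpos]
              simp [stepA, hD, PySem.List.pop?_natCast _ _ hlen, herase, ← hpos2]
            rw [hstep]; exact hA
        · -- any other action character: keep one word position
          obtain ⟨out'', hout''⟩ :
              ∃ o, (if (j:Int) < (w.length:Int) then out ++ [PySem.List.pyGetD w (j:Int) ' '] else out)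
                    = o ∧ o ++ w.drop (j+1) = out ++ w.drop j ∧
                  posOf w o (j+1) = posOf w out j + 1 := by
            by_cases hj : j < w.length
            · refine ⟨out ++ [w[j]], ?_, ?_, ?_⟩
              · rw [if_pos (by exact_mod_cast hj)]
                simp [PySem.List.pyGetD_natCast, List.getElem?_eq_getElem hj]
              · rw [List.append_assoc, List.singleton_append,
                  ← List.drop_eq_getElem_cons hj]
              · simp [posOf]; omega
            · refine ⟨out, if_neg (by exact_mod_cast hj), ?_, ?_⟩
              · rw [List.drop_eq_nil_of_le (by omega), List.drop_eq_nil_of_le (by omega)]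
              · simp [posOf]; omega
          obtain ⟨hif, hglue, hposn⟩ := hout''
          obtain ⟨out', j', k', hB, hA⟩ := ih out'' (j+1) k
            (hshift 1 0 (by simp [cRI, hR, hI]) (by simp [cNI, hI]))
          refine ⟨out', j', k', ?_, ?_⟩
          · have : goB w ls (f :: rest) out (j:Int) (k:Int)
                = goB w ls rest out'' ((j:Int) + 1) (k:Int) := by
              by_cases hj : (j:Int) < (w.length:Int)
              · rw [← hif, if_pos hj]; simp [goB, hR, hI, hD, hj]
              · rw [← hif, if_neg hj]; simp [goB, hR, hI, hD, hj]
            rw [this]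
            have e1 : ((j:Int) + 1) = (((j+1:Nat)):Int) := by push_cast; ring
            rw [e1]; exact hB
          · rw [List.foldl_cons]
            have hstep : (some (out ++ w.drop j, posOf w out j, (k:Int))).bind (fun st => stepA ls st f)
                = some (out'' ++ w.drop (j+1), posOf w out'' (j+1), (k:Int)) := by
              simp [stepA, hR, hI, hD, hglue, hposn]
            rw [hstep]; exact hA

-- ===== VERDICT (by name: the statement is the Claim_ definition above) =====
theorem modify_word_spec : Claim_equal_modify_word := by
  intro fw ea ls _ hpre
  unfold Spec_modify_word modify_word modify_word_alt
  obtain ⟨out', j', k', hB, hA⟩ :=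
    main_inv fw.toList ls.toList ea.toList [] 0 0 (by simpa using hpre)
  simp only [List.nil_append, List.drop_zero, Nat.cast_zero] at hB hA
  have hpos0 : posOf fw.toList [] 0 = 0 := by simp [posOf]
  rw [hpos0] at hA
  rw [foldl_append_build, List.nil_append]
  simp only [hA, hB, PySem.List.slice_from_natCast]
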